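-- pv_equiv track=rewrite | github.com/hans-cyfrin/sol-query | sol_query/query/engine_v2.py | _extract_usage_context
-- ===== SOURCE A (Python) =====
-- def _extract_usage_context(element_name: str, source: str) -> str:
--     """Extract contextual code around element usage."""
--     lines = source.split('\n')
--     for i, line in enumerate(lines):
--         if element_name in line:
--             # Return the line with some context
--             start = max(0, i - 1)
--             end = min(len(lines), i + 2)
--             context_lines = lines[start:end]
--             return '\n'.join(context_lines).strip()
--
--     return source[:100] + "..." if len(source) > 100 else source
-- ===== SOURCE B (Python) =====
-- def _extract_usage_context(element_name: str, source: str) -> str: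
--     """Extract contextual code around element usage."""
--     pos = source.find(element_name)
--     if pos != -1:
--         i = source[:pos].count('\n')
--         lines = source.split('\n')
--         return '\n'.join(lines[max(0, i - 1):i + 2]).strip()
--
--     return source[:100] + "..." if len(source) > 100 else source
-- ===== Notes on version B (the rewrite author's own statement) =====
-- stated objective: alternative
-- what changed: Replaces A's per-line enumerate loop with a membership test on every line by one whole-string find, recovering the line index by counting newlines before the match position; Pre_ excludes element_name containing a newline and occurring in source, where A's per-line test can never match (A falls back) while B's whole-string search finds it.
-- outside the precondition, e.g. on _extract_usage_context('a\nb', 'x\na\nb\nc'): A returns 'x\na\nb\nc', B returns 'x\na\nb'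
import Mathlib
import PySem

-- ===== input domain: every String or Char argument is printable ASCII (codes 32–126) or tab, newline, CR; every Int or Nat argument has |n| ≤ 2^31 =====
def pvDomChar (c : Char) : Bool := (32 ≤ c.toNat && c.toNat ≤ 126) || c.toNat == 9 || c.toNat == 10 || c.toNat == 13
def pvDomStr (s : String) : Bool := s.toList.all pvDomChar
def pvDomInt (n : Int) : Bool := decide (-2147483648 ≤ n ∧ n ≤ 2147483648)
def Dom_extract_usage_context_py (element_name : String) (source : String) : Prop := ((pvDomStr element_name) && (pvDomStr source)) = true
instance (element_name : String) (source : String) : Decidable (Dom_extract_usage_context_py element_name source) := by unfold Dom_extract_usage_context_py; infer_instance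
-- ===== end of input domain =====

-- B replaces A's per-line enumerate loop by one whole-string find plus newline counting
-- (alternative decomposition, same asymptotic cost); proved equal for needles without a newline.

-- ===== PORT A =====
-- 'source[:100] + "..." if len(source) > 100 else source' — identical last line of both Pythons
def pvTruncFallback (src : List Char) : List Char :=
  if (100 : Int) < (src.length : Int) then PySem.Chars.slice src none (some 100) ++ "...".toList
  else src

-- the 'for i, line in enumerate(lines): if element_name in line: return …' loop of A
def pvALoop (name : List Char) (lines : List (List Char)) : List (Int × List Char) → Option (List Char)
  | [] => none
  | (i, line) :: rest =>
    if PySem.Chars.isIn name line then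
      some (PySem.Chars.strip (PySem.Chars.join ['\n']
        (PySem.List.slice lines (some (max 0 (i - 1))) (some (min (lines.length : Int) (i + 2))))))
    else pvALoop name lines rest

def extract_usage_context_py (element_name : String) (source : String) : String :=
  let lines := PySem.Chars.splitOn source.toList ['\n']
  match pvALoop element_name.toList lines (PySem.List.enumerate lines) with
  | some ctx => String.ofList ctx
  | none => String.ofList (pvTruncFallback source.toList)

-- ===== PORT B =====
def extract_usage_context_py_alt (element_name : String) (source : String) : String :=
  let pos := PySem.Chars.find source.toList element_name.toList
  if pos ≠ -1 then
    let i : Int := ((PySem.Chars.count (PySem.Chars.slice source.toList none (some pos)) ['\n'] : Nat) : Int)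
    let lines := PySem.Chars.splitOn source.toList ['\n']
    String.ofList (PySem.Chars.strip (PySem.Chars.join ['\n']
      (PySem.List.slice lines (some (max 0 (i - 1))) (some (i + 2)))))
  else String.ofList (pvTruncFallback source.toList)

-- ===== PRECONDITION & SPEC =====
-- Pre_ excludes element_name containing a newline AND occurring in source: there A's per-line
-- membership test can never match (A falls back to the truncated source) while B's whole-string
-- search finds it; on such a multi-line needle both behaviours are defensible accidents.
def Pre_extract_usage_context_py (element_name : String) (source : String) : Prop :=
  '\n' ∉ element_name.toList ∨ PySem.Str.isIn element_name source = false
instance (element_name : String) (source : String) : Decidable (Pre_extract_usage_context_py element_name source) := by unfold Pre_extract_usage_context_py; infer_instance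

def pvWitness_extract_usage_context_py : String × String := ("foo", "bar\nfoo baz\nqux")

def Spec_extract_usage_context_py (element_name : String) (source : String) (out : String) : Prop := out = extract_usage_context_py_alt element_name source
instance (element_name : String) (source : String) (out : String) : Decidable (Spec_extract_usage_context_py element_name source out) := by unfold Spec_extract_usage_context_py; infer_instance

-- ===== CLAIM (what is proved, stated in full; the proofs are below) =====
def Claim_equal_extract_usage_context_py : Prop := ∀ (element_name : String) (source : String), Dom_extract_usage_context_py element_name source → Pre_extract_usage_context_py element_name source → Spec_extract_usage_context_py element_name source (extract_usage_context_py element_name source)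

-- ===== LEMMAS AND PROOFS =====

-- structural companion of PySem.Chars.splitOn for the single-character separator '\n'
def pvSplit (pre : List Char) : List Char → List (List Char)
  | [] => [pre]
  | c :: t => if c = '\n' then pre :: pvSplit [] t else pvSplit (pre ++ [c]) t

theorem pv_go_eq : ∀ (fuel : Nat) (l cur : List Char) (acc : List (List Char)),
    l.length ≤ fuel →
    PySem.Chars.splitOn.go ['\n'] fuel l cur acc = acc.reverse ++ pvSplit cur.reverse l := by
  intro fuel
  induction fuel with
  | zero =>
    intro l cur acc h
    have : l = [] := by cases l <;> simp_all
    subst this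
    simp [PySem.Chars.splitOn.go, pvSplit]
  | succ n ih =>
    intro l cur acc h
    cases l with
    | nil => simp [PySem.Chars.splitOn.go, pvSplit]
    | cons c rest =>
      by_cases hc : c = '\n'
      · subst hc
        rw [PySem.Chars.splitOn.go]
        rw [if_pos (by simp [List.isPrefixOf])]
        have hd : List.drop ['\n'].length ('\n' :: rest) = rest := by simp
        rw [hd, ih rest [] ((cur.reverse) :: acc) (by simpa using h)]
        simp [pvSplit]
      · rw [PySem.Chars.splitOn.go]
        have hpre : List.isPrefixOf ['\n'] (c :: rest) = false := by
          simp [List.isPrefixOf]; exact fun h' => (hc h'.symm).elim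
        rw [hpre]
        simp only [Bool.false_eq_true, if_false]
        rw [ih rest (c :: cur) acc (by simpa using h)]
        simp [pvSplit, hc]

theorem pv_splitOn_eq (s : List Char) : PySem.Chars.splitOn s ['\n'] = pvSplit [] s := by
  rw [PySem.Chars.splitOn, pv_go_eq (s.length + 1) s [] [] (by omega)]
  simp

theorem pv_count_go_eq : ∀ (fuel : Nat) (l : List Char) (acc : Nat),
    l.length ≤ fuel → PySem.Chars.count.go ['\n'] fuel l acc = acc + l.count '\n' := by
  intro fuel
  induction fuel with
  | zero =>
    intro l acc h
    have : l = [] := by cases l <;> simp_all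
    subst this; simp [PySem.Chars.count.go]
  | succ n ih =>
    intro l acc h
    cases l with
    | nil => simp [PySem.Chars.count.go]
    | cons c rest =>
      by_cases hc : c = '\n'
      · subst hc
        rw [PySem.Chars.count.go]
        rw [if_pos (by simp [List.isPrefixOf])]
        have hd : List.drop ['\n'].length ('\n' :: rest) = rest := by simp
        rw [hd, ih rest (acc + 1) (by simpa using h)]
        simp [List.count_cons]
        omega
      · rw [PySem.Chars.count.go]
        have hpre : List.isPrefixOf ['\n'] (c :: rest) = false := by
          simp [List.isPrefixOf]; exact fun h' => (hc h'.symm).elim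
        rw [hpre]
        simp only [Bool.false_eq_true, if_false]
        rw [ih rest acc (by simpa using h)]
        simp [List.count_cons, hc]

theorem pv_count_nl (s : List Char) : PySem.Chars.count s ['\n'] = s.count '\n' := by
  rw [PySem.Chars.count]
  simp only [List.isEmpty, if_false]
  rw [pv_count_go_eq s.length s 0 le_rfl]
  simp

theorem pv_split_no (l : List Char) : ∀ (pre : List Char), '\n' ∉ l → pvSplit pre l = [pre ++ l] := by
  induction l with
  | nil => intro pre h; simp [pvSplit]
  | cons c t ih =>
    intro pre h
    have hc : c ≠ '\n' := fun hh => h (by simp [hh])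
    rw [pvSplit, if_neg hc, ih (pre ++ [c]) (fun hm => h (by simp [hm]))]
    simp

theorem pv_split_app (l : List Char) : ∀ (r pre : List Char), '\n' ∉ l →
    pvSplit pre (l ++ '\n' :: r) = (pre ++ l) :: pvSplit [] r := by
  induction l with
  | nil => intro r pre h; simp [pvSplit]
  | cons c t ih =>
    intro r pre h
    have hc : c ≠ '\n' := fun hh => h (by simp [hh])
    rw [List.cons_append, pvSplit, if_neg hc, ih r (pre ++ [c]) (fun hm => h (by simp [hm]))]
    simp

theorem pv_slice_min (xs : List (List Char)) (i : Int) (hi : 0 ≤ i) :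
    PySem.List.slice xs (some (max 0 (i - 1))) (some (min (xs.length : Int) (i + 2))) =
    PySem.List.slice xs (some (max 0 (i - 1))) (some (i + 2)) := by
  simp only [PySem.List.slice, PySem.List.clampIdx]
  split_ifs <;> (congr 1) <;> omega

theorem pv_aloop_eq (name : List Char) (lines : List (List Char)) :
    ∀ (ls : List (List Char)) (k : Int),
    pvALoop name lines (PySem.List.enumerate ls k) =
      (List.findIdx? (fun l => PySem.Chars.isIn name l) ls).map (fun (j : Nat) =>
        PySem.Chars.strip (PySem.Chars.join ['\n']
          (PySem.List.slice lines (some (max 0 (k + (j : Int) - 1)))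
            (some (min (lines.length : Int) (k + (j : Int) + 2)))))) := by
  intro ls
  induction ls with
  | nil => intro k; simp [PySem.List.enumerate, pvALoop]
  | cons x t ih =>
    intro k
    rw [PySem.List.enumerate_cons, pvALoop, List.findIdx?_cons]
    by_cases hx : PySem.Chars.isIn name x
    · simp [hx]
    · rw [if_neg (by simp [hx]), if_neg (by simp [hx]), ih (k + 1)]
      cases h : List.findIdx? (fun l => PySem.Chars.isIn name l) t with
      | none => simp
      | some j =>
        simp only [Option.map_some]
        congr 1
        push_cast
        ring_nf

theorem pv_split_infix (s : List Char) : ∀ (pre line : List Char), line ∈ pvSplit pre s → line <:+: pre ++ s := by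
  induction s with
  | nil => intro pre line h; simp [pvSplit] at h; simp [h]
  | cons c t ih =>
    intro pre line h
    by_cases hc : c = '\n'
    · subst hc
      rw [pvSplit, if_pos rfl] at h
      rcases List.mem_cons.mp h with h | h
      · exact ⟨[], '\n' :: t, by simp [h]⟩
      · rcases ih [] line h with ⟨u, v, huv⟩
        exact ⟨pre ++ '\n' :: u, v, by simp at huv ⊢; rw [← huv]⟩
    · rw [pvSplit, if_neg hc] at h
      have := ih (pre ++ [c]) line h
      simpa using this

theorem pv_prefix_drop_infix {name s : List Char} {j : Nat} (hj : name <+: s.drop j) : name <:+: s := by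
  rcases hj with ⟨w, hw⟩
  refine ⟨s.take j, w, ?_⟩
  have h := (List.take_append_drop j s).symm
  rw [← hw] at h
  simpa [List.append_assoc] using h.symm

theorem pv_find_le (s name : List Char) (j : Nat) (hj : name <+: s.drop j) :
    0 ≤ PySem.Chars.find s name ∧ (PySem.Chars.find s name).toNat ≤ j := by
  have hpos : 0 ≤ PySem.Chars.find s name :=
    (PySem.Chars.find_nonneg_iff s name).mpr (pv_prefix_drop_infix hj)
  refine ⟨hpos, ?_⟩
  by_contra hlt
  exact ((PySem.Chars.find_spec hpos).2 j (by omega)) hj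

theorem pv_no_match (name s : List Char) (h : PySem.Chars.find s name = -1) :
    List.findIdx? (fun l => PySem.Chars.isIn name l) (pvSplit [] s) = none := by
  rw [List.findIdx?_eq_none_iff]
  intro line hline
  by_contra hc
  have hin : name <:+: line := by
    rw [Bool.not_eq_false] at hc
    exact (PySem.Chars.isIn_iff_infix _ _).mp hc
  have hls : line <:+: s := by simpa using pv_split_infix s [] line hline
  exact ((PySem.Chars.find_eq_neg_one_iff s name).mp h) (hin.trans hls)

-- first match of a '\n'-free needle that misses the first line lies after the first newline
theorem pv_skip_line (name l r : List Char) (hn : '\n' ∉ name) (_hl : '\n' ∉ l)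
    (hout : ¬ name <:+: l) (hpos : 0 ≤ PySem.Chars.find (l ++ '\n' :: r) name) :
    PySem.Chars.find (l ++ '\n' :: r) name = l.length + 1 + PySem.Chars.find r name ∧
      0 ≤ PySem.Chars.find r name := by
  set s := l ++ '\n' :: r with hs
  obtain ⟨hpref, hmin⟩ := PySem.Chars.find_spec hpos
  set p := (PySem.Chars.find s name).toNat with hp
  have hdrop0 : p ≤ l.length → s.drop p = l.drop p ++ '\n' :: r := by
    intro hple
    rw [hs, List.drop_append, (by omega : p - l.length = 0)]
    rfl
  have hLp : l.length + 1 ≤ p := by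
    by_contra hle
    push Not at hle
    have hdrop := hdrop0 (by omega)
    by_cases hsmall : p + name.length ≤ l.length
    · -- the match would lie inside l
      apply hout
      have hpl : name <+: l.drop p := by
        have h1 : name = (l.drop p ++ '\n' :: r).take name.length := by
          rcases hpref with ⟨w, hw⟩
          rw [hdrop] at hw
          rw [← hw]; simp
        rw [List.take_append, (by simp; omega : name.length - (l.drop p).length = 0)] at h1
        simp only [List.take_zero, List.append_nil] at h1
        rw [h1]
        exact List.take_prefix _ _
      rcases hpl with ⟨w, hw⟩
      refine ⟨l.take p, w, ?_⟩
      have h := (List.take_append_drop p l).symm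
      rw [← hw] at h
      simpa [List.append_assoc] using h.symm
    · -- the match window would cover the newline
      exfalso
      push Not at hsmall
      rcases hpref with ⟨w, hw⟩
      have hnl2 : (l.drop p ++ '\n' :: r)[l.length - p]? = some '\n' := by
        rw [List.getElem?_append_right (by simp)]
        simp
      rw [← hdrop, ← hw] at hnl2
      rw [List.getElem?_append_left (by omega : l.length - p < name.length)] at hnl2
      exact hn (List.mem_of_getElem? hnl2)
  -- matches beyond the newline are matches in r
  have hdropr : ∀ (j : Nat), l.length + 1 ≤ j → s.drop j = r.drop (j - l.length - 1) := by
    intro j hj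
    rw [hs, List.drop_append, (by omega : j - l.length = (j - l.length - 1) + 1)]
    rw [List.drop_eq_nil_of_le (by omega : l.length ≤ j)]
    simp
  have hrm : name <+: r.drop (p - l.length - 1) := by rw [← hdropr p hLp]; exact hpref
  obtain ⟨hq0, hqle⟩ := pv_find_le r name (p - l.length - 1) hrm
  set q := (PySem.Chars.find r name).toNat with hq
  have hsm : name <+: s.drop (l.length + 1 + q) := by
    rw [hdropr _ (by omega), (by omega : l.length + 1 + q - l.length - 1 = q)]
    exact (PySem.Chars.find_spec hq0).1
  obtain ⟨_, hple⟩ := pv_find_le s name (l.length + 1 + q) hsm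
  constructor
  · omega
  · exact hq0

theorem pv_first_nl (s : List Char) (hs : '\n' ∈ s) :
    ∃ l t, '\n' ∉ l ∧ s = l ++ '\n' :: t := by
  induction s with
  | nil => simp at hs
  | cons c u ih =>
    by_cases hc : c = '\n'
    · exact ⟨[], u, by simp, by simp [hc]⟩
    · have hu : '\n' ∈ u := by
        rcases List.mem_cons.mp hs with h | h
        · exact absurd h.symm hc
        · exact h
      obtain ⟨l, t, h1, h2⟩ := ih hu
      exact ⟨c :: l, t, by simp [h1]; exact fun h => hc h.symm, by simp [h2]⟩

theorem pv_main (name : List Char) (hn : '\n' ∉ name) :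
    ∀ (s : List Char), 0 ≤ PySem.Chars.find s name →
    List.findIdx? (fun l => PySem.Chars.isIn name l) (pvSplit [] s) =
      some ((List.take (PySem.Chars.find s name).toNat s).count '\n') := by
  have key : ∀ (n : Nat) (s : List Char), s.length ≤ n → 0 ≤ PySem.Chars.find s name →
      List.findIdx? (fun l => PySem.Chars.isIn name l) (pvSplit [] s) =
        some ((List.take (PySem.Chars.find s name).toNat s).count '\n') := by
    intro n
    induction n with
    | zero =>
      intro s hlen hpos
      have hse : s = [] := by cases s <;> simp_all
      subst hse
      by_cases hname : name.isEmpty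
      · have hname' : name = [] := by cases name <;> simp_all
        subst hname'
        decide
      · have hfind : PySem.Chars.find ([] : List Char) name = -1 := by
          show PySem.Chars.find.go name [] 0 = -1
          rw [PySem.Chars.find.go]
          simp [hname]
        rw [hfind] at hpos
        omega
    | succ n ih =>
      intro s hlen hpos
      by_cases hnl : '\n' ∈ s
      · obtain ⟨l, t, hlnn, hseq⟩ := pv_first_nl s hnl
        subst hseq
        rw [pv_split_app l t [] hlnn]
        simp only [List.nil_append]
        by_cases hinl : name <:+: l
        · -- first line already contains the needle
          have hisin : PySem.Chars.isIn name l = true := (PySem.Chars.isIn_iff_infix _ _).mpr hinl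
          rw [List.findIdx?_cons, if_pos hisin]
          obtain ⟨u, v, huv⟩ := hinl
          have hdropu : (l ++ '\n' :: t).drop u.length = name ++ (v ++ '\n' :: t) := by
            have h2 : l ++ '\n' :: t = u ++ (name ++ (v ++ '\n' :: t)) := by
              rw [← huv]; simp
            rw [h2, List.drop_append]
            simp
          obtain ⟨_, hple⟩ := pv_find_le (l ++ '\n' :: t) name u.length ⟨v ++ '\n' :: t, hdropu.symm⟩
          have hulen : u.length ≤ l.length := by
            have : l.length = u.length + name.length + v.length := by
              rw [← huv]; simp only [List.length_append]
            omega
          have hz : ((l ++ '\n' :: t).take (PySem.Chars.find (l ++ '\n' :: t) name).toNat).count '\n' = 0 := by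
            rw [List.take_append, (by omega : (PySem.Chars.find (l ++ '\n' :: t) name).toNat - l.length = 0)]
            simp only [List.take_zero, List.append_nil]
            rw [List.count_eq_zero]
            intro hm
            exact hlnn ((List.take_sublist _ _).subset hm)
          rw [hz]
        · -- needle misses the first line: recurse on t
          have hisin : PySem.Chars.isIn name l = false := by
            rw [PySem.Chars.isIn_eq_false_iff]
            exact hinl
          rw [List.findIdx?_cons, if_neg (by simp [hisin])]
          obtain ⟨hfeq, hq0⟩ := pv_skip_line name l t hn hlnn hinl hpos
          have htlen : t.length ≤ n := by
            simp only [List.length_append, List.length_cons] at hlen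
            omega
          rw [ih t htlen hq0]
          simp only [Option.map_some]
          have htoNat : (PySem.Chars.find (l ++ '\n' :: t) name).toNat =
              l.length + 1 + (PySem.Chars.find t name).toNat := by
            rw [hfeq]; omega
          rw [htoNat, List.take_append,
            (by omega : l.length + 1 + (PySem.Chars.find t name).toNat - l.length =
              (PySem.Chars.find t name).toNat + 1),
            List.take_of_length_le (by omega : l.length ≤ l.length + 1 + (PySem.Chars.find t name).toNat),
            List.take_succ_cons]
          have hcl : l.count '\n' = 0 := List.count_eq_zero.mpr hlnn
          simp [List.count_append, hcl]
      · have hone : pvSplit [] s = [s] := by simpa using pv_split_no s [] hnl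
        rw [hone]
        have hins : PySem.Chars.isIn name s = true := by
          rw [PySem.Chars.isIn_iff_infix]
          exact (PySem.Chars.find_nonneg_iff s name).mp hpos
        rw [List.findIdx?_cons, if_pos hins]
        have hz : (s.take (PySem.Chars.find s name).toNat).count '\n' = 0 := by
          rw [List.count_eq_zero]
          intro hm
          exact hnl ((List.take_sublist _ _).subset hm)
        rw [hz]
  intro s
  exact key s.length s le_rfl

-- ===== VERDICT (by name: the statement is the Claim_ definition above) =====
theorem extract_usage_context_py_spec : Claim_equal_extract_usage_context_py := by
  intro e src _ hpre
  unfold Spec_extract_usage_context_py extract_usage_context_py extract_usage_context_py_alt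
  simp only [pv_splitOn_eq, PySem.Chars.slice_eq_listSlice]
  rw [pv_aloop_eq]
  by_cases hneg : PySem.Chars.find src.toList e.toList = -1
  · rw [pv_no_match e.toList src.toList hneg]
    simp [hneg]
  · have h0 : 0 ≤ PySem.Chars.find src.toList e.toList := by
      have := PySem.Chars.neg_one_le_find src.toList e.toList
      omega
    have hpre' : '\n' ∉ e.toList := by
      rcases hpre with h | h
      · exact h
      · exfalso
        apply hneg
        rw [PySem.Chars.find_eq_neg_one_iff]
        have hC : PySem.Chars.isIn e.toList src.toList = false := by simpa using h
        exact (PySem.Chars.isIn_eq_false_iff _ _).mp hC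
    rw [pv_main e.toList hpre' src.toList h0]
    rw [if_pos hneg]
    rw [PySem.List.slice_to src.toList h0, pv_count_nl]
    simp only [Option.map_some, zero_add]
    rw [pv_slice_min _ _ (by positivity)]
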